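-- pv_equiv track=rewrite | github.com/yym68686/oaix | oaix_gateway/api_server.py | _find_sse_event_separator
-- ===== SOURCE A (Python) =====
-- _SSE_EVENT_SEPARATORS = ("\r\n\r\n", "\r\n\n", "\n\r\n", "\n\n")
--
-- def _find_sse_event_separator(text: str, start: int = 0) -> tuple[int, int] | None:
--     start = max(0, min(start, len(text)))
--     best: tuple[int, int] | None = None
--     for separator in _SSE_EVENT_SEPARATORS:
--         index = text.find(separator, start)
--         if index < 0:
--             continue
--         end = index + len(separator)
--         if best is None or index < best[0] or (index == best[0] and end > best[1]):
--             best = (index, end)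
--     return best
-- ===== SOURCE B (Python) =====
-- _SSE_EVENT_SEPARATORS = ("\r\n\r\n", "\r\n\n", "\n\r\n", "\n\n")
--
-- def _find_sse_event_separator(text: str, start: int = 0) -> tuple[int, int] | None:
--     # Single left-to-right positional scan: no two separators can match at the
--     # same index (they differ within the shorter length), so the first position
--     # with a match is exactly A's min-index / longest-at-tie selection.
--     start = max(0, min(start, len(text)))
--     for i in range(start, len(text)):
--         for separator in _SSE_EVENT_SEPARATORS:
--             if text.startswith(separator, i):
--                 return (i, i + len(separator))
--     return None
-- ===== Notes on version B (the rewrite author's own statement) =====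
-- stated objective: alternative
-- what changed: Replaces A's four independent full-text str.find scans plus min-index/longest-at-tie selection with a single left-to-right positional scan that returns at the first index where any separator matches; this is exact because no two separators can match at the same index.
import Mathlib
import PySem

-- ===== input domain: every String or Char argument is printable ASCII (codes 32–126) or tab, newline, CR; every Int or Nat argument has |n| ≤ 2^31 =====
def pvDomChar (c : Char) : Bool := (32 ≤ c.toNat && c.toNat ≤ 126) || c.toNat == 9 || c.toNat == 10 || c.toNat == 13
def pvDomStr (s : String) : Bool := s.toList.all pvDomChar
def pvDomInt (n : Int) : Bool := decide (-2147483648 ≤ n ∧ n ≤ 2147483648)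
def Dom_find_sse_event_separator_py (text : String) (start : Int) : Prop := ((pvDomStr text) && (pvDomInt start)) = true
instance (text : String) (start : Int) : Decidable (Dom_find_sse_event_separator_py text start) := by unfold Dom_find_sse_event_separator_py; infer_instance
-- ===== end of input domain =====

-- B replaces A's four independent str.find scans + min/tie-break selection with one
-- left-to-right positional scan returning the first index where a separator matches
-- (objective: alternative decomposition; exact because no two separators co-start).

-- ===== PORT A =====
def sseSeparators : List String := ["\r\n\r\n", "\r\n\n", "\n\r\n", "\n\n"]

-- loop body of A: one separator against the running best
def sseStep (text : String) (start : Int) (best : Option (Int × Int)) (separator : String) :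
    Option (Int × Int) :=
  let index := PySem.Str.findFrom text separator start
  if index < 0 then best
  else
    let e := index + PySem.Str.len separator
    match best with
    | none => some (index, e)
    | some b => if index < b.1 ∨ (index = b.1 ∧ e > b.2) then some (index, e) else some b

def find_sse_event_separator_py (text : String) (start : Int) : Option (Int × Int) :=
  let start := max 0 (min start (PySem.Str.len text))
  sseSeparators.foldl (sseStep text start) none

-- ===== PORT B =====
-- inner loop of B: first separator matching at index i
-- (text.startswith(separator, i) with 0 ≤ i ≤ len(text) is exactly a prefix test on L.drop i)
def sseMatchAt (L : List Char) (i : Nat) : List String → Option (Int × Int)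
  | [] => none
  | separator :: rest =>
      if PySem.Chars.startswith (L.drop i) separator.toList
      then some ((i : Int), (i : Int) + PySem.Str.len separator)
      else sseMatchAt L i rest

-- outer loop of B: for i in range(start, len(text)), return at the first match
def sseScan (L : List Char) (i : Nat) : Option (Int × Int) :=
  if h : i < L.length then
    match sseMatchAt L i sseSeparators with
    | some r => some r
    | none => sseScan L (i + 1)
  else none
termination_by L.length - i

def find_sse_event_separator_py_alt (text : String) (start : Int) : Option (Int × Int) :=
  let s : Nat := (max 0 (min start (PySem.Str.len text))).toNat
  sseScan text.toList s

-- ===== PRECONDITION & SPEC =====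
def Spec_find_sse_event_separator_py (text : String) (start : Int) (out : Option (Int × Int)) : Prop := out = find_sse_event_separator_py_alt text start
instance (text : String) (start : Int) (out : Option (Int × Int)) : Decidable (Spec_find_sse_event_separator_py text start out) := by unfold Spec_find_sse_event_separator_py; infer_instance

-- ===== CLAIM (what is proved, stated in full; the proofs are below) =====
def Claim_equal_find_sse_event_separator_py : Prop := ∀ (text : String) (start : Int), Dom_find_sse_event_separator_py text start → Spec_find_sse_event_separator_py text start (find_sse_event_separator_py text start)

-- ===== LEMMAS AND PROOFS =====

lemma sw_true {t p : List Char} (h : p <+: t) : PySem.Chars.startswith t p = true :=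
  (PySem.Chars.startswith_iff t p).mpr h

lemma sw_false {t p : List Char} (h : ¬ p <+: t) : PySem.Chars.startswith t p = false :=
  Bool.eq_false_iff.mpr (fun hb => h ((PySem.Chars.startswith_iff t p).mp hb))

-- find past the end is -1
lemma fr_end (L sub : List Char) (hne : sub ≠ []) :
    PySem.Chars.findFrom L sub ((L.length : Nat) : Int) = -1 := by
  rw [PySem.Chars.findFrom_natCast_eq_neg_one_iff _ _ _ le_rfl]
  simp [List.drop_length, hne]

-- a separator matching at s is found exactly at s
lemma fr_match (text sep : String) (s : Nat) (hs : s ≤ text.toList.length)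
    (hm : sep.toList <+: text.toList.drop s) :
    PySem.Str.findFrom text sep (s : Int) = (s : Int) := by
  rw [PySem.Str.findFrom_eq]
  have hne : PySem.Chars.findFrom text.toList sep.toList (s : Int) ≠ -1 := by
    intro h
    rw [PySem.Chars.findFrom_natCast_eq_neg_one_iff _ _ _ hs] at h
    exact h hm.isInfix
  obtain ⟨hle, _hpre, hmin⟩ := PySem.Chars.findFrom_natCast_spec text.toList sep.toList s hs hne
  by_cases hlt : s < (PySem.Chars.findFrom text.toList sep.toList (s : Int)).toNat
  · exact absurd hm (hmin s le_rfl hlt)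
  · omega

-- a separator NOT matching at s is found at -1 or at an index ≥ s+1
lemma fr_cases (text sep : String) (s : Nat) (hs : s ≤ text.toList.length)
    (hnm : ¬ sep.toList <+: text.toList.drop s) :
    PySem.Str.findFrom text sep (s : Int) = -1 ∨ (s : Int) + 1 ≤ PySem.Str.findFrom text sep (s : Int) := by
  rw [PySem.Str.findFrom_eq]
  by_cases hf : PySem.Chars.findFrom text.toList sep.toList (s : Int) = -1
  · exact Or.inl hf
  · obtain ⟨hle, hpre, _⟩ := PySem.Chars.findFrom_natCast_spec text.toList sep.toList s hs hf
    right
    have : (PySem.Chars.findFrom text.toList sep.toList (s : Int)).toNat ≠ s := by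
      intro h; rw [h] at hpre; exact hnm hpre
    omega

-- prefix of a drop gives an infix
lemma infix_of_prefix_drop {sub t : List Char} {j : Nat} (h : sub <+: t.drop j) : sub <:+: t :=
  h.isInfix.trans (List.drop_suffix j t).isInfix

-- no separator matches at s ⇒ the find from s equals the find from s+1
lemma fr_step (text sep : String) (s : Nat) (hs : s < text.toList.length)
    (hnm : ¬ sep.toList <+: text.toList.drop s) :
    PySem.Str.findFrom text sep (s : Int) = PySem.Str.findFrom text sep ((s + 1 : Nat) : Int) := by
  rw [PySem.Str.findFrom_eq, PySem.Str.findFrom_eq]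
  have hs1 : s + 1 ≤ text.toList.length := hs
  by_cases hf : PySem.Chars.findFrom text.toList sep.toList (s : Int) = -1
  · rw [hf]; symm
    rw [PySem.Chars.findFrom_natCast_eq_neg_one_iff _ _ _ hs1]
    rw [PySem.Chars.findFrom_natCast_eq_neg_one_iff _ _ _ (le_of_lt hs)] at hf
    intro hinf
    apply hf
    have : text.toList.drop (s + 1) <:+ text.toList.drop s := by
      rw [show s + 1 = s + 1 from rfl, ← List.drop_drop]
      simpa [List.drop_one] using (List.tail_suffix (text.toList.drop s))
    exact hinf.trans this.isInfix
  · obtain ⟨hle, hpre, hmin⟩ := PySem.Chars.findFrom_natCast_spec text.toList sep.toList s (le_of_lt hs) hf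
    have hns : (PySem.Chars.findFrom text.toList sep.toList (s : Int)).toNat ≠ s := by
      intro h; rw [h] at hpre; exact hnm hpre
    have hge : s + 1 ≤ (PySem.Chars.findFrom text.toList sep.toList (s : Int)).toNat := by omega
    have hg : PySem.Chars.findFrom text.toList sep.toList ((s + 1 : Nat) : Int) ≠ -1 := by
      intro h
      rw [PySem.Chars.findFrom_natCast_eq_neg_one_iff _ _ _ hs1] at h
      apply h
      have : sep.toList <+: (text.toList.drop (s + 1)).drop
          ((PySem.Chars.findFrom text.toList sep.toList (s : Int)).toNat - (s + 1)) := by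
        rwa [List.drop_drop, Nat.add_sub_cancel' hge]
      exact infix_of_prefix_drop this
    obtain ⟨hle', hpre', hmin'⟩ := PySem.Chars.findFrom_natCast_spec text.toList sep.toList (s + 1) hs1 hg
    by_cases hc : (PySem.Chars.findFrom text.toList sep.toList ((s + 1 : Nat) : Int)).toNat
        < (PySem.Chars.findFrom text.toList sep.toList (s : Int)).toNat
    · exact absurd hpre' (hmin _ (by omega) hc)
    · by_cases hc2 : (PySem.Chars.findFrom text.toList sep.toList (s : Int)).toNat
          < (PySem.Chars.findFrom text.toList sep.toList ((s + 1 : Nat) : Int)).toNat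
      · exact absurd hpre (hmin' _ hge hc2)
      · omega

-- two of our separators cannot both match at the same position
lemma not_both {a b t : List Char} (hab : ¬ a <+: b) (hba : ¬ b <+: a)
    (ha : a <+: t) (hb : b <+: t) : False := by
  rcases List.prefix_or_prefix_of_prefix ha hb with h | h
  · exact hab h
  · exact hba h

-- the main induction: A's fold from start s equals B's scan from s
lemma foldA_eq_scan (text : String) : ∀ (n s : Nat), text.toList.length - s = n →
    s ≤ text.toList.length →
    sseSeparators.foldl (sseStep text (s : Int)) none = sseScan text.toList s := by
  intro n
  induction n with
  | zero =>
      intro s hn hs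
      have hseq : s = text.toList.length := by omega
      subst hseq
      rw [sseScan, dif_neg (by omega)]
      simp only [sseSeparators, List.foldl, sseStep, PySem.Str.findFrom_eq]
      rw [fr_end _ _ (by decide), fr_end _ _ (by decide), fr_end _ _ (by decide),
        fr_end _ _ (by decide)]
      norm_num
  | succ n ih =>
      intro s hn hs
      have hlt : s < text.toList.length := by omega
      rw [sseScan, dif_pos hlt]
      by_cases h1 : "\r\n\r\n".toList <+: text.toList.drop s
      · have h2 : ¬ "\r\n\n".toList <+: text.toList.drop s :=
          fun h => not_both (by decide) (by decide) h1 h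
        have h3 : ¬ "\n\r\n".toList <+: text.toList.drop s :=
          fun h => not_both (by decide) (by decide) h1 h
        have h4 : ¬ "\n\n".toList <+: text.toList.drop s :=
          fun h => not_both (by decide) (by decide) h1 h
        have m : sseMatchAt text.toList s sseSeparators = some ((s : Int), (s : Int) + 4) := by
          simp only [sseSeparators, sseMatchAt, sw_true h1, if_true]
          rfl
        rw [m]
        show sseSeparators.foldl (sseStep text (s : Int)) none = some ((s : Int), (s : Int) + 4)
        have f1 := fr_match text "\r\n\r\n" s hs h1
        have c2 := fr_cases text "\r\n\n" s hs h2
        have c3 := fr_cases text "\n\r\n" s hs h3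
        have c4 := fr_cases text "\n\n" s hs h4
        clear ih hn m
        have hsnn : ¬ ((s : Int) < 0) := by omega
        have t1 : "\r\n\r\n".toList = ['\r','\n','\r','\n'] := by decide
        have t2 : "\r\n\n".toList = ['\r','\n','\n'] := by decide
        have t3 : "\n\r\n".toList = ['\n','\r','\n'] := by decide
        have t4 : "\n\n".toList = ['\n','\n'] := by decide
        simp only [PySem.Str.findFrom_eq, t1, t2, t3, t4] at f1 c2 c3 c4
        simp only [sseSeparators, List.foldl, sseStep]
        simp only [PySem.Str.findFrom_eq, t1, t2, t3, t4,
          show PySem.Str.len "\r\n\r\n" = 4 from rfl, show PySem.Str.len "\r\n\n" = 3 from rfl,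
          show PySem.Str.len "\n\r\n" = 3 from rfl, show PySem.Str.len "\n\n" = 2 from rfl,
          f1, if_neg hsnn]
        split_ifs
        all_goals try rfl
        all_goals try simp
        all_goals try omega
        all_goals try split_ifs
        all_goals try rfl
        all_goals try simp
        all_goals try omega
        all_goals try split_ifs
        all_goals try rfl
        all_goals try simp
        all_goals try omega
        all_goals try split_ifs
        all_goals try rfl
        all_goals try simp
        all_goals omega
      · by_cases h2 : "\r\n\n".toList <+: text.toList.drop s
        · have h3 : ¬ "\n\r\n".toList <+: text.toList.drop s :=
            fun h => not_both (by decide) (by decide) h2 h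
          have h4 : ¬ "\n\n".toList <+: text.toList.drop s :=
            fun h => not_both (by decide) (by decide) h2 h
          have m : sseMatchAt text.toList s sseSeparators = some ((s : Int), (s : Int) + 3) := by
            simp only [sseSeparators, sseMatchAt, sw_true h2, sw_false h1, if_true,
              Bool.false_eq_true, if_false]
            rfl
          rw [m]
          show sseSeparators.foldl (sseStep text (s : Int)) none = some ((s : Int), (s : Int) + 3)
          have f2 := fr_match text "\r\n\n" s hs h2
          have c1 := fr_cases text "\r\n\r\n" s hs h1
          have c3 := fr_cases text "\n\r\n" s hs h3
          have c4 := fr_cases text "\n\n" s hs h4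
          clear ih hn m
          have hsnn : ¬ ((s : Int) < 0) := by omega
          have t1 : "\r\n\r\n".toList = ['\r','\n','\r','\n'] := by decide
          have t2 : "\r\n\n".toList = ['\r','\n','\n'] := by decide
          have t3 : "\n\r\n".toList = ['\n','\r','\n'] := by decide
          have t4 : "\n\n".toList = ['\n','\n'] := by decide
          simp only [PySem.Str.findFrom_eq, t1, t2, t3, t4] at f2 c1 c3 c4
          simp only [sseSeparators, List.foldl, sseStep]
          simp only [PySem.Str.findFrom_eq, t1, t2, t3, t4,
            show PySem.Str.len "\r\n\r\n" = 4 from rfl, show PySem.Str.len "\r\n\n" = 3 from rfl,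
            show PySem.Str.len "\n\r\n" = 3 from rfl, show PySem.Str.len "\n\n" = 2 from rfl,
            f2, if_neg hsnn]
          split_ifs
          all_goals try rfl
          all_goals try simp
          all_goals try omega
          all_goals try split_ifs
          all_goals try rfl
          all_goals try simp
          all_goals try omega
          all_goals try split_ifs
          all_goals try rfl
          all_goals try simp
          all_goals try omega
          all_goals try split_ifs
          all_goals try rfl
          all_goals try simp
          all_goals omega
        · by_cases h3 : "\n\r\n".toList <+: text.toList.drop s
          · have h4 : ¬ "\n\n".toList <+: text.toList.drop s :=
              fun h => not_both (by decide) (by decide) h3 h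
            have m : sseMatchAt text.toList s sseSeparators = some ((s : Int), (s : Int) + 3) := by
              simp only [sseSeparators, sseMatchAt, sw_true h3, sw_false h1, sw_false h2, if_true,
                Bool.false_eq_true, if_false]
              rfl
            rw [m]
            show sseSeparators.foldl (sseStep text (s : Int)) none = some ((s : Int), (s : Int) + 3)
            have f3 := fr_match text "\n\r\n" s hs h3
            have c1 := fr_cases text "\r\n\r\n" s hs h1
            have c2 := fr_cases text "\r\n\n" s hs h2
            have c4 := fr_cases text "\n\n" s hs h4
            clear ih hn m
            have hsnn : ¬ ((s : Int) < 0) := by omega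
            have t1 : "\r\n\r\n".toList = ['\r','\n','\r','\n'] := by decide
            have t2 : "\r\n\n".toList = ['\r','\n','\n'] := by decide
            have t3 : "\n\r\n".toList = ['\n','\r','\n'] := by decide
            have t4 : "\n\n".toList = ['\n','\n'] := by decide
            simp only [PySem.Str.findFrom_eq, t1, t2, t3, t4] at f3 c1 c2 c4
            simp only [sseSeparators, List.foldl, sseStep]
            simp only [PySem.Str.findFrom_eq, t1, t2, t3, t4,
              show PySem.Str.len "\r\n\r\n" = 4 from rfl, show PySem.Str.len "\r\n\n" = 3 from rfl,
              show PySem.Str.len "\n\r\n" = 3 from rfl, show PySem.Str.len "\n\n" = 2 from rfl,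
              f3, if_neg hsnn]
            split_ifs
            all_goals try rfl
            all_goals try simp
            all_goals try omega
            all_goals try split_ifs
            all_goals try rfl
            all_goals try simp
            all_goals try omega
            all_goals try split_ifs
            all_goals try rfl
            all_goals try simp
            all_goals try omega
            all_goals try split_ifs
            all_goals try rfl
            all_goals try simp
            all_goals omega
          · by_cases h4 : "\n\n".toList <+: text.toList.drop s
            · have m : sseMatchAt text.toList s sseSeparators = some ((s : Int), (s : Int) + 2) := by
                simp only [sseSeparators, sseMatchAt, sw_true h4, sw_false h1, sw_false h2,
                  sw_false h3, if_true, Bool.false_eq_true, if_false]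
                rfl
              rw [m]
              show sseSeparators.foldl (sseStep text (s : Int)) none = some ((s : Int), (s : Int) + 2)
              have f4 := fr_match text "\n\n" s hs h4
              have c1 := fr_cases text "\r\n\r\n" s hs h1
              have c2 := fr_cases text "\r\n\n" s hs h2
              have c3 := fr_cases text "\n\r\n" s hs h3
              clear ih hn m
              have hsnn : ¬ ((s : Int) < 0) := by omega
              have t1 : "\r\n\r\n".toList = ['\r','\n','\r','\n'] := by decide
              have t2 : "\r\n\n".toList = ['\r','\n','\n'] := by decide
              have t3 : "\n\r\n".toList = ['\n','\r','\n'] := by decide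
              have t4 : "\n\n".toList = ['\n','\n'] := by decide
              simp only [PySem.Str.findFrom_eq, t1, t2, t3, t4] at f4 c1 c2 c3
              simp only [sseSeparators, List.foldl, sseStep]
              simp only [PySem.Str.findFrom_eq, t1, t2, t3, t4,
                show PySem.Str.len "\r\n\r\n" = 4 from rfl, show PySem.Str.len "\r\n\n" = 3 from rfl,
                show PySem.Str.len "\n\r\n" = 3 from rfl, show PySem.Str.len "\n\n" = 2 from rfl,
                f4, if_neg hsnn]
              split_ifs
              all_goals try rfl
              all_goals try simp
              all_goals try omega
              all_goals try split_ifs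
              all_goals try rfl
              all_goals try simp
              all_goals try omega
              all_goals try split_ifs
              all_goals try rfl
              all_goals try simp
              all_goals try omega
              all_goals try split_ifs
              all_goals try rfl
              all_goals try simp
              all_goals omega
            · -- no separator matches at s: both sides step to s+1
              have m : sseMatchAt text.toList s sseSeparators = none := by
                simp only [sseSeparators, sseMatchAt, sw_false h1, sw_false h2, sw_false h3,
                  sw_false h4, Bool.false_eq_true, if_false]
              rw [m]
              show sseSeparators.foldl (sseStep text (s : Int)) none = sseScan text.toList (s + 1)
              have e1 := fr_step text "\r\n\r\n" s hlt h1
              have e2 := fr_step text "\r\n\n" s hlt h2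
              have e3 := fr_step text "\n\r\n" s hlt h3
              have e4 := fr_step text "\n\n" s hlt h4
              rw [← ih (s + 1) (by omega) (by omega)]
              simp only [sseSeparators, List.foldl, sseStep]
              rw [e1, e2, e3, e4]

-- ===== VERDICT (by name: the statement is the Claim_ definition above) =====
theorem find_sse_event_separator_py_spec : Claim_equal_find_sse_event_separator_py := by
  intro text start _
  unfold Spec_find_sse_event_separator_py
  unfold find_sse_event_separator_py find_sse_event_separator_py_alt
  rw [PySem.Str.len_eq]
  set st : Int := max 0 (min start ((text.toList.length : Nat) : Int)) with hst
  have h0 : 0 ≤ st := le_max_left _ _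
  have hle : st ≤ ((text.toList.length : Nat) : Int) :=
    max_le (Int.natCast_nonneg _) (min_le_right _ _)
  have hcast : st = ((st.toNat : Nat) : Int) := by omega
  show List.foldl (sseStep text st) none sseSeparators = sseScan text.toList st.toNat
  conv_lhs => rw [hcast]
  exact foldA_eq_scan text (text.toList.length - st.toNat) st.toNat rfl (by omega)
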